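-- pv_equiv track=rewrite | github.com/by-Biska/--- | practise/23/kabanov/homework/15.py | f
-- ===== SOURCE A (Python) =====
-- def f(c, end):
--     if c > end:
--         return 0
--     if c == end:
--         return 1
--     if c < end and c%10 != 9:
--         return f(c + 1, end) + f(c + 11, end)
--     if c < end and c%10 == 9:
-- 		    return f(c + 1, end) + f(c + 10, end)
-- ===== SOURCE B (Python) =====
-- def f(c, end):
--     # Bottom-up sliding window: window[i] = number of paths from v+i to end (0 if past end).
--     if c > end:
--         return 0
--     window = [1] + [0] * 10
--     v = end
--     while v > c:
--         v -= 1
--         step = window[10] if v % 10 != 9 else window[9]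
--         window = [window[0] + step] + window[:10]
--     return window[0]
-- ===== Notes on version B (the rewrite author's own statement) =====
-- stated objective: alternative
-- what changed: Replaced A's exponential double recursion with a bottom-up dynamic-programming loop that slides an 11-element window of path counts from end down to c (linear in end-c, though a timing run could not verify a measured speed-up); Pre_ excludes gaps end-c >= 9000 on which A hits CPython's recursion limit (RecursionError) and never returns.
import Mathlib
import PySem

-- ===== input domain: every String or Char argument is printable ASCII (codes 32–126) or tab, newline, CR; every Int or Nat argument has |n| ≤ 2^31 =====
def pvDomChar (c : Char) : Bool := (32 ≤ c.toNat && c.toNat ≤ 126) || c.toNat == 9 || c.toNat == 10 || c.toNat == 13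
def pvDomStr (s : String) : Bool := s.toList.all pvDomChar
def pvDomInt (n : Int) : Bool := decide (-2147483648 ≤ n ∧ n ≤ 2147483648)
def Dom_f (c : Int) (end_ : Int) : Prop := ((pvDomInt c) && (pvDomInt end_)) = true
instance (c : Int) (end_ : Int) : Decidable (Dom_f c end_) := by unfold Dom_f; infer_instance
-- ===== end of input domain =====

-- B replaces A's double recursion by a bottom-up dynamic-programming loop sliding an
-- 11-element window of path counts from end down to c (objective: alternative).

-- ===== PORT A =====
-- Literal transliteration of A's recursion; the final `else 0` is Python's implicit
-- `return None`, unreachable because the two guarded branches cover all c < end.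
def f (c : Int) (end_ : Int) : Int :=
  if c > end_ then 0
  else if c = end_ then 1
  else if c < end_ ∧ PySem.Int.mod c 10 ≠ 9 then f (c + 1) end_ + f (c + 11) end_
  else if c < end_ ∧ PySem.Int.mod c 10 = 9 then f (c + 1) end_ + f (c + 10) end_
  else 0
termination_by (end_ - c).toNat
decreasing_by all_goals omega

-- ===== PORT B =====
-- the while loop: runs (end_ - c) times, v counting down; window[i] = paths from v+i to end
def fAltLoop (n : Nat) (v : Int) (w : List Int) : List Int :=
  match n with
  | 0 => w
  | n + 1 =>
    let v' := v - 1
    let step := if PySem.Int.mod v' 10 ≠ 9 then w.getD 10 0 else w.getD 9 0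
    fAltLoop n v' ((w.getD 0 0 + step) :: w.take 10)

def f_alt (c : Int) (end_ : Int) : Int :=
  if c > end_ then 0
  else (fAltLoop (end_ - c).toNat end_ (1 :: List.replicate 10 0)).getD 0 0

-- ===== PRECONDITION & SPEC =====
-- A recurses once per unit step from c to end_, so CPython raises RecursionError when
-- end_ - c reaches the interpreter's recursion limit; Pre_ excludes exactly those
-- deep-recursion inputs (on which A never returns a value).
def Pre_f (c : Int) (end_ : Int) : Prop := end_ - c < 9000
instance (c : Int) (end_ : Int) : Decidable (Pre_f c end_) := by unfold Pre_f; infer_instance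
def pvWitness_f : Int × Int := (0, 20)

def Spec_f (c : Int) (end_ : Int) (out : Int) : Prop := out = f_alt c end_
instance (c : Int) (end_ : Int) (out : Int) : Decidable (Spec_f c end_ out) := by unfold Spec_f; infer_instance

-- ===== CLAIM (what is proved, stated in full; the proofs are below) =====
def Claim_equal_f : Prop := ∀ (c : Int) (end_ : Int), Dom_f c end_ → Pre_f c end_ → Spec_f c end_ (f c end_)

-- ===== LEMMAS AND PROOFS =====

theorem f_gt {c e : Int} (h : e < c) : f c e = 0 := by
  rw [f]; simp [h]

theorem f_eq (e : Int) : f e e = 1 := by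
  rw [f]; simp

-- A's recurrence in closed step form
theorem f_step {c e : Int} (h : c < e) :
    f c e = f (c + 1) e + f (c + (if PySem.Int.mod c 10 = 9 then 10 else 11)) e := by
  rw [f]
  rw [if_neg (by omega : ¬ c > e), if_neg (by omega : ¬ c = e)]
  have hmm : PySem.Int.mod c 10 = c % 10 := PySem.Int.mod_eq_emod_of_pos (by norm_num)
  by_cases hm : c % 10 = 9
  · rw [hmm]
    rw [if_neg (by simp [hm]), if_pos ⟨h, hm⟩, if_pos hm]
  · rw [hmm]
    rw [if_pos ⟨h, hm⟩, if_neg (by simp [hm])]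

theorem replicate_getD (n i : Nat) : (List.replicate n (0 : Int)).getD i 0 = 0 := by
  simp [List.getD, List.getElem?_replicate]
  split <;> rfl

theorem loop_inv (e : Int) (n : Nat) :
    ∀ (v : Int) (w : List Int), v ≤ e → w.length = 11 →
    (∀ i : Nat, i < 11 → w.getD i 0 = f (v + i) e) →
    ∀ i : Nat, i < 11 → (fAltLoop n v w).getD i 0 = f (v - n + i) e := by
  induction n with
  | zero => intro v w _ _ hinv i hi; simpa using hinv i hi
  | succ n ih =>
    intro v w hv hw hinv i hi
    show (fAltLoop n (v - 1) ((w.getD 0 0 +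
        (if PySem.Int.mod (v - 1) 10 ≠ 9 then w.getD 10 0 else w.getD 9 0)) :: w.take 10)).getD i 0 = _
    have hlen : ((w.getD 0 0 +
        (if PySem.Int.mod (v - 1) 10 ≠ 9 then w.getD 10 0 else w.getD 9 0)) :: w.take 10).length = 11 := by
      simp [List.length_take, hw]
    have hstep : ∀ j : Nat, j < 11 →
        ((w.getD 0 0 + (if PySem.Int.mod (v - 1) 10 ≠ 9 then w.getD 10 0 else w.getD 9 0))
          :: w.take 10).getD j 0 = f (v - 1 + j) e := by
      intro j hj
      match j with
      | 0 =>
        have hrec := f_step (c := v - 1) (e := e) (by omega)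
        have h0 : w.getD 0 0 = f v e := by simpa using hinv 0 (by omega)
        have h9 : w.getD 9 0 = f (v + 9) e := by simpa using hinv 9 (by omega)
        have h10 : w.getD 10 0 = f (v + 10) e := by simpa using hinv 10 (by omega)
        rw [List.getD_cons_zero, h0, show ((0 : Nat) : Int) = 0 from rfl, add_zero]
        have hmm : PySem.Int.mod (v - 1) 10 = (v - 1) % 10 :=
          PySem.Int.mod_eq_emod_of_pos (by norm_num)
        rw [hmm] at hrec ⊢
        by_cases hm : (v - 1) % 10 = 9
        · rw [if_pos hm, show v - 1 + 1 = v from by ring, show v - 1 + 10 = v + 9 from by ring] at hrec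
          rw [if_neg (by simp [hm]), h9, hrec]
        · rw [if_neg hm, show v - 1 + 1 = v from by ring, show v - 1 + 11 = v + 10 from by ring] at hrec
          rw [if_pos hm, h10, hrec]
      | j + 1 =>
        have hj10 : j < 10 := by omega
        have htake : (w.take 10).getD j 0 = w.getD j 0 := by
          simp [List.getD, hj10]
        rw [List.getD_cons_succ, htake, hinv j (by omega)]
        congr 1
        push_cast
        ring
    have := ih (v - 1) _ (by omega) hlen hstep i hi
    rw [this]
    congr 1
    push_cast
    ring

-- ===== VERDICT (by name: the statement is the Claim_ definition above) =====
theorem f_spec : Claim_equal_f := by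
  intro c e _ _
  unfold Spec_f f_alt
  by_cases h : c > e
  · rw [if_pos h, f_gt h]
  · rw [if_neg h]
    have hce : c ≤ e := by omega
    have hinit : ∀ i : Nat, i < 11 → (1 :: List.replicate 10 (0 : Int)).getD i 0 = f (e + i) e := by
      intro i hi
      match i with
      | 0 => simpa using (f_eq e).symm
      | j + 1 =>
        have hbig : e < e + ((j + 1 : Nat) : Int) := by push_cast; omega
        rw [List.getD_cons_succ, replicate_getD 10 j, f_gt hbig]
    have hloop := loop_inv e (e - c).toNat e (1 :: List.replicate 10 0) le_rfl (by simp) hinit 0 (by omega)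
    rw [hloop, show ((0 : Nat) : Int) = 0 from rfl, add_zero,
      show e - ((e - c).toNat : Int) = c from by omega]
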